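-- pv_equiv track=rewrite | github.com/jdavancens/surge-dart-drift | surge/tools/utilities/sum_elements.py | _check_sum_slices_at_specification
-- ===== SOURCE A (Python) =====
-- def _check_sum_slices_at_specification(pairs):
--     try:
--         assert isinstance(pairs, list)
--         assert all(isinstance(x, tuple) and len(x) == 2 and 0 < x[-1]
--                    for x in pairs)
--         indices_affected = []
--         for pair in pairs:
--             indices_affected.extend(range(pair[0], sum(pair)))
--         assert len(indices_affected) == len(set(indices_affected))
--     except AssertionError:
--         return False
--     return True
-- ===== SOURCE B (Python) =====
-- def _check_sum_slices_at_specification(pairs):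
--     if not isinstance(pairs, list):
--         return False
--     if not all(isinstance(x, tuple) and len(x) == 2 and x[1] > 0 for x in pairs):
--         return False
--     ivs = sorted(((s, s + n) for s, n in pairs), key=lambda iv: iv[0])
--     return all(p[1] <= q[0] for p, q in zip(ivs, ivs[1:]))
-- ===== Notes on version B (the rewrite author's own statement) =====
-- stated objective: alternative
-- what changed: Instead of materializing every index of every (start,length) range and comparing list length to set length, B sorts the (start,end) intervals by start and checks that each adjacent pair satisfies end <= next start (asymptotically better in the total span, but a timing run's inputs mostly fail the shape guard, so no measured speed-up).
import Mathlib
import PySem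

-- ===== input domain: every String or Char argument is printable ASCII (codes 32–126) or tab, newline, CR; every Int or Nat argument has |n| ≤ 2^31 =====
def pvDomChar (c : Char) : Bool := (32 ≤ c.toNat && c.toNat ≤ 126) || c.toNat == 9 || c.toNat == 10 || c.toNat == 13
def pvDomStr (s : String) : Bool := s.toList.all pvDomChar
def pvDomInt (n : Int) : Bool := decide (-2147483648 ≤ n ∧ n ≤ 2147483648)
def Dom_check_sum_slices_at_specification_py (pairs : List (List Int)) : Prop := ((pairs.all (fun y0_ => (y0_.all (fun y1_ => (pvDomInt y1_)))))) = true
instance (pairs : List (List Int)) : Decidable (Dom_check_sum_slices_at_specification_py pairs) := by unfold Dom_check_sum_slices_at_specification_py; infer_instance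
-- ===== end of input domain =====

-- B replaces A's materialization of every affected index (list vs set length) by sorting the
-- (start,end) intervals and checking adjacent non-overlap; the proof shows the two checks agree.

-- ===== PORT A =====
-- pair[0]/x[-1] are only evaluated by Python under the len(x)==2 guard, so the total pyGetD
-- with default 0 is exact where it is reached.
def check_sum_slices_at_specification_py (pairs : List (List Int)) : Bool :=
  if pairs.all (fun x => x.length == 2 && decide (0 < PySem.List.pyGetD x (-1) 0)) then
    let indices := pairs.foldl
      (fun acc pair => acc ++ PySem.List.pyRange (PySem.List.pyGetD pair 0 0) pair.sum) []
    indices.length == (PySem.Set.ofList indices).length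
  else
    false

-- ===== PORT B =====
-- (s, s + n) for a length-2 pair; unpacking is only reached under the len(x)==2 guard.
def pvIv (p : List Int) : Int × Int :=
  (PySem.List.pyGetD p 0 0, PySem.List.pyGetD p 0 0 + PySem.List.pyGetD p 1 0)

def check_sum_slices_at_specification_py_alt (pairs : List (List Int)) : Bool :=
  if pairs.all (fun x => x.length == 2 && decide (0 < PySem.List.pyGetD x 1 0)) then
    let ivs := PySem.List.sorted (pairs.map pvIv) (fun iv => iv.1)
    (ivs.zip (PySem.List.slice ivs (some 1))).all (fun pq => decide (pq.1.2 ≤ pq.2.1))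
  else
    false

-- ===== PRECONDITION & SPEC =====
def Spec_check_sum_slices_at_specification_py (pairs : List (List Int)) (out : Bool) : Prop := out = check_sum_slices_at_specification_py_alt pairs
instance (pairs : List (List Int)) (out : Bool) : Decidable (Spec_check_sum_slices_at_specification_py pairs out) := by unfold Spec_check_sum_slices_at_specification_py; infer_instance

-- ===== CLAIM (what is proved, stated in full; the proofs are below) =====
def Claim_equal_check_sum_slices_at_specification_py : Prop := ∀ (pairs : List (List Int)), Dom_check_sum_slices_at_specification_py pairs → Spec_check_sum_slices_at_specification_py pairs (check_sum_slices_at_specification_py pairs)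

-- ===== LEMMAS AND PROOFS =====

-- the two validity guards agree (x[-1] = x[1] on length-2 lists)
theorem pv_guard_eq (x : List Int) :
    (x.length == 2 && decide (0 < PySem.List.pyGetD x (-1) 0))
      = (x.length == 2 && decide (0 < PySem.List.pyGetD x 1 0)) := by
  by_cases h : x.length = 2
  · obtain ⟨a, b, rfl⟩ := List.length_eq_two.mp h
    simp [PySem.List.pyGetD, PySem.List.pyGet?, PySem.List.pyIdx?]
  · have h2 : (x.length == 2) = false := by simpa using h
    simp [h2]

-- length-preserving dedup characterizes Nodup
theorem pv_len_ofList_eq_iff (xs : List Int) :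
    xs.length = (PySem.Set.ofList xs).length ↔ xs.Nodup := by
  constructor
  · intro h
    have hperm : (PySem.Set.ofList xs).Perm xs.dedup := by
      apply (List.perm_ext_iff_of_nodup (PySem.Set.nodup_ofList xs) xs.nodup_dedup).mpr
      intro a; rw [PySem.Set.mem_ofList, List.mem_dedup]
    have hlen : xs.dedup.length = xs.length := by
      rw [← hperm.length_eq, ← h]
    have := (List.dedup_sublist xs).eq_of_length hlen
    rw [← this]; exact xs.nodup_dedup
  · intro h; rw [PySem.Set.ofList_eq_self_of_nodup xs h]

-- disjointness of two nonempty integer ranges is the interval condition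
theorem pv_disjoint_range_iff (iv jv : Int × Int) (hi : iv.1 < iv.2) (hj : jv.1 < jv.2) :
    List.Disjoint (PySem.List.pyRange iv.1 iv.2) (PySem.List.pyRange jv.1 jv.2)
      ↔ iv.2 ≤ jv.1 ∨ jv.2 ≤ iv.1 := by
  constructor
  · intro hd
    by_contra hno
    exact hd (PySem.List.mem_pyRange_one.mpr (by omega : iv.1 ≤ max iv.1 jv.1 ∧ max iv.1 jv.1 < iv.2))
      (PySem.List.mem_pyRange_one.mpr (by omega : jv.1 ≤ max iv.1 jv.1 ∧ max iv.1 jv.1 < jv.2))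
  · rintro h a ha hb
    rw [PySem.List.mem_pyRange_one] at ha hb
    omega

-- the adjacent check on a list of nonempty intervals equals pairwise "ends before next starts"
theorem pv_zip_all_iff_pairwise (s : List (Int × Int)) (hne : ∀ iv ∈ s, iv.1 < iv.2) :
    ((s.zip (s.drop 1)).all (fun pq => decide (pq.1.2 ≤ pq.2.1)) = true)
      ↔ s.Pairwise (fun p q => p.2 ≤ q.1) := by
  induction s with
  | nil => simp
  | cons a t ih =>
    cases t with
    | nil => simp
    | cons b u =>
      have hne' : ∀ iv ∈ b :: u, iv.1 < iv.2 := fun iv h => hne iv (List.mem_cons_of_mem a h)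
      constructor
      · intro h
        simp only [List.drop_one, List.tail_cons, List.zip_cons_cons, List.all_cons,
          Bool.and_eq_true, decide_eq_true_eq] at h
        obtain ⟨hab, hrest⟩ := h
        have hp : (b :: u).Pairwise (fun p q => p.2 ≤ q.1) := by
          apply (ih hne').mp
          simpa [List.drop_one] using hrest
        refine List.Pairwise.cons ?_ hp
        intro x hx
        rcases List.mem_cons.mp hx with rfl | hx
        · exact hab
        · have hbu : ∀ x ∈ u, b.2 ≤ x.1 := (List.pairwise_cons.mp hp).1
          have := hbu x hx
          have hb : b.1 < b.2 := hne' b (List.mem_cons_self)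
          omega
      · intro h
        obtain ⟨hhead, hp⟩ := List.pairwise_cons.mp h
        simp only [List.drop_one, List.tail_cons, List.zip_cons_cons, List.all_cons,
          Bool.and_eq_true, decide_eq_true_eq]
        refine ⟨hhead b List.mem_cons_self, ?_⟩
        simpa [List.drop_one] using (ih hne').mpr hp
  
-- main body equality under a valid guard
theorem pv_body_eq (pairs : List (List Int))
    (hv : ∀ p ∈ pairs, p.length = 2 ∧ 0 < PySem.List.pyGetD p 1 0) :
    ((pairs.foldl (fun acc pair => acc ++ PySem.List.pyRange (PySem.List.pyGetD pair 0 0) pair.sum) []).length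
        == (PySem.Set.ofList (pairs.foldl (fun acc pair => acc ++ PySem.List.pyRange (PySem.List.pyGetD pair 0 0) pair.sum) [])).length)
      = ((PySem.List.sorted (pairs.map pvIv) (fun iv => iv.1)).zip
          ((PySem.List.sorted (pairs.map pvIv) (fun iv => iv.1)).drop 1)).all
          (fun pq => decide (pq.1.2 ≤ pq.2.1)) := by
  have hne0 : ∀ iv ∈ pairs.map pvIv, iv.1 < iv.2 := by
    intro iv hiv
    obtain ⟨p, hp, rfl⟩ := List.mem_map.mp hiv
    have := (hv p hp).2
    simp only [pvIv]
    omega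
  have hfold : pairs.foldl (fun acc pair => acc ++ PySem.List.pyRange (PySem.List.pyGetD pair 0 0) pair.sum) []
      = ((pairs.map pvIv).map (fun iv => PySem.List.pyRange iv.1 iv.2)).flatten := by
    rw [PySem.List.foldl_append_eq_flatMap, List.nil_append, List.flatMap_def, List.map_map]
    congr 1
    apply List.map_congr_left
    intro p hp
    obtain ⟨a, b, rfl⟩ := List.length_eq_two.mp (hv p hp).1
    simp [pvIv, PySem.List.pyGetD, PySem.List.pyGet?, PySem.List.pyIdx?]
  rw [hfold]
  have hperm : (PySem.List.sorted (pairs.map pvIv) (fun iv => iv.1)).Perm (pairs.map pvIv) :=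
    PySem.List.sorted_perm _ _ _
  have hneS : ∀ iv ∈ PySem.List.sorted (pairs.map pvIv) (fun iv => iv.1), iv.1 < iv.2 :=
    fun iv h => hne0 iv (hperm.mem_iff.mp h)
  apply Bool.eq_iff_iff.mpr
  rw [beq_iff_eq, pv_len_ofList_eq_iff,
    pv_zip_all_iff_pairwise _ hneS, List.nodup_flatten, List.pairwise_map]
  have hnodups : ∀ l ∈ (pairs.map pvIv).map (fun iv => PySem.List.pyRange iv.1 iv.2), l.Nodup := by
    intro l hl
    obtain ⟨iv, _, rfl⟩ := List.mem_map.mp hl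
    exact PySem.List.nodup_pyRange_one iv.1 iv.2
  -- interval formulation of pairwise disjointness, on the unsorted list
  have hdisj : (pairs.map pvIv).Pairwise
        (fun a b => List.Disjoint (PySem.List.pyRange a.1 a.2) (PySem.List.pyRange b.1 b.2))
      ↔ (pairs.map pvIv).Pairwise (fun p q => p.2 ≤ q.1 ∨ q.2 ≤ p.1) := by
    constructor
    · exact List.Pairwise.imp_of_mem (fun {a b} ha hb h =>
        (pv_disjoint_range_iff a b (hne0 a ha) (hne0 b hb)).mp h)
    · exact List.Pairwise.imp_of_mem (fun {a b} ha hb h =>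
        (pv_disjoint_range_iff a b (hne0 a ha) (hne0 b hb)).mpr h)
  have hsym : ∀ {x y : Int × Int}, (x.2 ≤ y.1 ∨ y.2 ≤ x.1) → (y.2 ≤ x.1 ∨ x.2 ≤ y.1) :=
    fun h => h.symm
  have hmove : (pairs.map pvIv).Pairwise (fun p q => p.2 ≤ q.1 ∨ q.2 ≤ p.1)
      ↔ (PySem.List.sorted (pairs.map pvIv) (fun iv => iv.1)).Pairwise (fun p q => p.2 ≤ q.1 ∨ q.2 ≤ p.1) :=
    (List.Perm.pairwise_iff hsym hperm).symm
  constructor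
  · intro h
    have hR := hmove.mp (hdisj.mp h.2)
    have hkey := PySem.List.sorted_pairwise (pairs.map pvIv) (fun iv => iv.1)
    refine (hR.and hkey).imp_of_mem (fun {a b} ha hb h => ?_)
    obtain ⟨hor, hab⟩ := h
    have h1 := hneS a ha
    have h2 := hneS b hb
    omega
  · intro h
    refine ⟨hnodups, hdisj.mpr (hmove.mpr (h.imp (fun h => Or.inl h)))⟩


-- ===== VERDICT (by name: the statement is the Claim_ definition above) =====
theorem check_sum_slices_at_specification_py_spec : Claim_equal_check_sum_slices_at_specification_py := by
  intro pairs _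
  unfold Spec_check_sum_slices_at_specification_py
  unfold check_sum_slices_at_specification_py check_sum_slices_at_specification_py_alt
  rw [show (fun x : List Int => x.length == 2 && decide (0 < PySem.List.pyGetD x (-1) 0))
        = (fun x : List Int => x.length == 2 && decide (0 < PySem.List.pyGetD x 1 0)) from
      funext pv_guard_eq]
  by_cases hg : pairs.all (fun x => x.length == 2 && decide (0 < PySem.List.pyGetD x 1 0)) = true
  · rw [if_pos hg, if_pos hg]
    have hv : ∀ p ∈ pairs, p.length = 2 ∧ 0 < PySem.List.pyGetD p 1 0 := by
      intro p hp
      have := List.all_eq_true.mp hg p hp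
      simp only [Bool.and_eq_true, beq_iff_eq, decide_eq_true_eq] at this
      exact this
    show ((pairs.foldl (fun acc pair => acc ++ PySem.List.pyRange (PySem.List.pyGetD pair 0 0) pair.sum) []).length
        == (PySem.Set.ofList (pairs.foldl (fun acc pair => acc ++ PySem.List.pyRange (PySem.List.pyGetD pair 0 0) pair.sum) [])).length)
      = ((PySem.List.sorted (pairs.map pvIv) (fun iv => iv.1)).zip
          (PySem.List.slice (PySem.List.sorted (pairs.map pvIv) (fun iv => iv.1)) (some 1))).all
          (fun pq => decide (pq.1.2 ≤ pq.2.1))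
    rw [PySem.List.slice_from _ (by omega : (0:Int) ≤ 1)]
    exact pv_body_eq pairs hv
  · rw [if_neg hg, if_neg hg]
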